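-- pv_equiv track=rewrite | github.com/richard-shi/advent-of-code-2017 | day4/day4.py | unique_words
-- ===== SOURCE A (Python) =====
-- def unique_words(phrase):
--     """ Returns if a phrase has only unique words """
--     used_words = set()
--
--     words = phrase.split()
--     for word in words:
--         if word in used_words:
--             return False
--         used_words.add(word)
--
--     return True
-- ===== SOURCE B (Python) =====
-- def unique_words(phrase):
--     """ Returns if a phrase has only unique words """
--     words = sorted(phrase.split())
--     return all(a != b for a, b in zip(words, words[1:]))
-- ===== Notes on version B (the rewrite author's own statement) =====
-- stated objective: alternative
-- what changed: Replaced the hash-set membership loop with sort-then-scan: sort the words and check that no two adjacent sorted words are equal (duplicates must be adjacent after sorting).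
import Mathlib
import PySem

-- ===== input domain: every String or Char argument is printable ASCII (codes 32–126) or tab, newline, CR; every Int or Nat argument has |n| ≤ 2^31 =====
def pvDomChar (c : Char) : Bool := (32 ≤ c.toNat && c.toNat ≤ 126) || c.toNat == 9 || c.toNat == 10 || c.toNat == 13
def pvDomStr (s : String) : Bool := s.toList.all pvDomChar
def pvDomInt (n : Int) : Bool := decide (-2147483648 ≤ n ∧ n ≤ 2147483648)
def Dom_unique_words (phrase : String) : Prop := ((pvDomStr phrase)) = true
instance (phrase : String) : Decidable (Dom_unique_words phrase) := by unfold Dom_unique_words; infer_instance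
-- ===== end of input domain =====

-- B replaces A's hash-set membership loop by sort-then-scan: sort the words, then check no two adjacent words are equal; same result, O(n log n) instead of O(n).

-- ===== PORT A =====
-- the for-loop over words with the 'used_words' set and the early 'return False'
def uniqueLoop : List String → PySem.Set String → Bool
  | [], _ => true
  | w :: ws, used =>
      if PySem.Set.contains used w then false
      else uniqueLoop ws (PySem.Set.add used w)

def unique_words (phrase : String) : Bool :=
  uniqueLoop (PySem.Str.split₀ phrase) PySem.Set.empty

-- ===== PORT B =====
-- all(a != b for a, b in zip(words, words[1:])) on the sorted word list
def unique_words_alt (phrase : String) : Bool :=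
  let words := PySem.List.sorted (PySem.Str.split₀ phrase) (fun x => x) false
  (words.zip (PySem.List.slice words (some 1) none)).all (fun p => p.1 != p.2)

-- ===== PRECONDITION & SPEC =====
def Spec_unique_words (phrase : String) (out : Bool) : Prop := out = unique_words_alt phrase
instance (phrase : String) (out : Bool) : Decidable (Spec_unique_words phrase out) := by unfold Spec_unique_words; infer_instance

-- ===== CLAIM (what is proved, stated in full; the proofs are below) =====
def Claim_equal_unique_words : Prop := ∀ (phrase : String), Dom_unique_words phrase → Spec_unique_words phrase (unique_words phrase)

-- ===== LEMMAS AND PROOFS =====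

theorem uniqueLoop_true_iff (ws : List String) : ∀ (used : PySem.Set String),
    uniqueLoop ws used = true ↔ (ws.Nodup ∧ ∀ w ∈ ws, w ∉ used) := by
  induction ws with
  | nil => intro used; simp [uniqueLoop]
  | cons w ws ih =>
    intro used
    simp only [uniqueLoop]
    by_cases h : w ∈ used
    · have hc : PySem.Set.contains used w = true := (PySem.Set.contains_iff used w).2 h
      rw [hc]
      simp only [if_true]
      constructor
      · intro hfalse; exact absurd hfalse (by simp)
      · rintro ⟨_, hall⟩; exact absurd h (hall w (by simp))
    · have hc : PySem.Set.contains used w = false := by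
        simp only [PySem.Set.contains_eq_listContains, List.contains_eq_mem, decide_eq_false_iff_not]
        simpa using h
      rw [hc]
      simp only [Bool.false_eq_true, if_false]
      rw [ih]
      simp only [List.nodup_cons, List.mem_cons, PySem.Set.mem_add]
      constructor
      · rintro ⟨hnd, hall⟩
        refine ⟨⟨fun hm => hall w hm (Or.inr rfl), hnd⟩, ?_⟩
        rintro v (rfl | hv)
        · exact h
        · exact fun hvs => hall v hv (Or.inl hvs)
      · rintro ⟨⟨hwn, hnd⟩, hall⟩
        refine ⟨hnd, fun v hv => ?_⟩
        rintro (hvs | rfl)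
        · exact hall v (Or.inr hv) hvs
        · exact hwn hv

-- the adjacent-pair scan of B is exactly IsChain (· ≠ ·)
theorem zip_tail_all_ne_iff_chain' (l : List String) :
    ((l.zip (l.drop 1)).all (fun p => p.1 != p.2)) = true ↔ l.IsChain (· ≠ ·) := by
  induction l with
  | nil => simp
  | cons a l ih =>
    cases l with
    | nil => simp
    | cons b t =>
      simp only [List.drop_one, List.tail_cons, List.zip_cons_cons, List.all_cons,
        Bool.and_eq_true, bne_iff_ne, List.isChain_cons_cons]
      rw [← ih]
      simp

-- two chains on the same list combine pointwise
theorem isChain_and {α : Type} {R S : α → α → Prop} (l : List α)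
    (hR : l.IsChain R) (hS : l.IsChain S) : l.IsChain (fun a b => R a b ∧ S a b) := by
  induction l with
  | nil => exact .nil
  | cons a l ih =>
    cases l with
    | nil => exact .singleton _
    | cons b t =>
      rw [List.isChain_cons_cons] at hR hS ⊢
      exact ⟨⟨hR.1, hS.1⟩, ih hR.2 hS.2⟩

-- on a ≤-sorted list, no equal adjacent pair ↔ Nodup
theorem sorted_chain'_ne_iff_nodup (l : List String) (hs : l.Pairwise (· ≤ ·)) :
    l.IsChain (· ≠ ·) ↔ l.Nodup := by
  constructor
  · intro hc
    have hlt : l.IsChain (· < ·) :=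
      (isChain_and l hs.isChain hc).imp (fun {_ _} h => lt_of_le_of_ne h.1 h.2)
    exact (List.isChain_iff_pairwise.1 hlt).imp (fun h => ne_of_lt h)
  · intro hnd
    exact hnd.isChain

-- ===== VERDICT (by name: the statement is the Claim_ definition above) =====
theorem unique_words_spec : Claim_equal_unique_words := by
  intro phrase _
  unfold Spec_unique_words unique_words unique_words_alt
  set ws := PySem.Str.split₀ phrase with hws
  set sw := PySem.List.sorted ws (fun x => x) false with hsw
  have hslice : PySem.List.slice sw (some 1) none = sw.drop 1 := by
    simpa using PySem.List.slice_from_natCast (xs := sw) (a := 1)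
  show uniqueLoop ws PySem.Set.empty = (sw.zip (PySem.List.slice sw (some 1) none)).all (fun p => p.1 != p.2)
  rw [hslice, Bool.eq_iff_iff, uniqueLoop_true_iff, zip_tail_all_ne_iff_chain']
  have hsp : sw.Pairwise (· ≤ ·) := by
    simpa using PySem.List.sorted_pairwise (xs := ws) (key := fun x => x)
  have hperm : sw.Perm ws := PySem.List.sorted_perm ws (fun x => x) false
  rw [sorted_chain'_ne_iff_nodup sw hsp]
  constructor
  · rintro ⟨hnd, _⟩; exact (hperm.nodup_iff).2 hnd
  · intro hnd; exact ⟨(hperm.nodup_iff).1 hnd, by simp [PySem.Set.empty]⟩
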